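-- pv_equiv track=rewrite | github.com/JBeggs/fambrifarms-backend | whatsapp/smart_product_matcher.py | _compatible_units
-- ===== SOURCE A (Python) =====
-- def _compatible_units(unit1: str, unit2: str) -> bool:
--     """Check if units are compatible"""
--     compatible_groups = [
--         {'kg', 'g'},
--         {'ml', 'l'},
--         {'piece', 'each', 'pcs'},
--         {'bag', 'packet', 'pack'},
--         {'box', 'tray'}
--     ]
--
--     for group in compatible_groups:
--         if unit1 in group and unit2 in group:
--             return True
--
--     return unit1 == unit2
-- ===== SOURCE B (Python) =====
-- # Normalize each unit to its group's canonical representative, then compare once.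
-- _CANON = {
--     'g': 'kg',
--     'ml': 'l',
--     'each': 'piece', 'pcs': 'piece',
--     'packet': 'bag', 'pack': 'bag',
--     'tray': 'box',
-- }
--
--
-- def _compatible_units(unit1: str, unit2: str) -> bool:
--     """Check if units are compatible"""
--     return _CANON.get(unit1, unit1) == _CANON.get(unit2, unit2)
-- ===== Notes on version B (the rewrite author's own statement) =====
-- stated objective: idiomatic
-- what changed: Instead of scanning groups and testing joint membership with an equality fallback, B normalizes each unit to a canonical representative of its group and returns a single equality test; correct because the groups are disjoint.
import Mathlib
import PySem

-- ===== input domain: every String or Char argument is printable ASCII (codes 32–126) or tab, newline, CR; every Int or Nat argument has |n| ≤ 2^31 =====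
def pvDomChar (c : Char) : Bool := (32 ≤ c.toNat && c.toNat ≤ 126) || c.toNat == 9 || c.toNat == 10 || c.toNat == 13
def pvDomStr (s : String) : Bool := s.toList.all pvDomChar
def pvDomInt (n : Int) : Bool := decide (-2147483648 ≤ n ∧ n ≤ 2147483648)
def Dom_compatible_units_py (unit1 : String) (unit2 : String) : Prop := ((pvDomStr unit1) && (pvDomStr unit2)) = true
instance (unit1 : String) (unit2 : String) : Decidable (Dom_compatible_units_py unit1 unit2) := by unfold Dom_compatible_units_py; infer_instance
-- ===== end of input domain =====

-- B normalizes each unit to its group's canonical representative and compares once, instead of A's scan over groups with joint-membership tests and an equality fallback (idiomatic; correct since the groups are disjoint).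


-- ===== PORT A =====
-- the literal list of compatible groups from A
def pvGroupsA : List (PySem.Set String) :=
  [PySem.Set.ofList ["kg", "g"],
   PySem.Set.ofList ["ml", "l"],
   PySem.Set.ofList ["piece", "each", "pcs"],
   PySem.Set.ofList ["bag", "packet", "pack"],
   PySem.Set.ofList ["box", "tray"]]

-- A's for-loop with early return
def pvLoopA (unit1 : String) (unit2 : String) : List (PySem.Set String) → Bool
  | [] => unit1 == unit2
  | g :: rest =>
      if PySem.Set.contains g unit1 && PySem.Set.contains g unit2 then true
      else pvLoopA unit1 unit2 rest

def compatible_units_py (unit1 : String) (unit2 : String) : Bool :=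
  pvLoopA unit1 unit2 pvGroupsA

-- ===== PORT B =====
-- B's module-level unit -> canonical representative table
def pvCanonTbl : PySem.Dict String String :=
  PySem.Dict.ofList
    [("g", "kg"), ("ml", "l"), ("each", "piece"), ("pcs", "piece"),
     ("packet", "bag"), ("pack", "bag"), ("tray", "box")]

-- _CANON.get(u, u)
def pvCanon (u : String) : String := (pvCanonTbl.get? u).getD u

def compatible_units_py_alt (unit1 : String) (unit2 : String) : Bool :=
  pvCanon unit1 == pvCanon unit2

-- ===== PRECONDITION & SPEC =====
def Spec_compatible_units_py (unit1 : String) (unit2 : String) (out : Bool) : Prop := out = compatible_units_py_alt unit1 unit2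
instance (unit1 : String) (unit2 : String) (out : Bool) : Decidable (Spec_compatible_units_py unit1 unit2 out) := by unfold Spec_compatible_units_py; infer_instance

-- ===== CLAIM =====
def Claim_equal_compatible_units_py : Prop := ∀ (unit1 : String) (unit2 : String), Dom_compatible_units_py unit1 unit2 → Spec_compatible_units_py unit1 unit2 (compatible_units_py unit1 unit2)

-- ===== LEMMAS AND PROOFS =====
-- the known unit strings (the union of A's groups)
def pvKnown : List String :=
  ["kg", "g", "ml", "l", "piece", "each", "pcs", "bag", "packet", "pack", "box", "tray"]

theorem pv_canon_of_not_known (u : String) (hu : u ∉ pvKnown) : pvCanon u = u := by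
  have hU : pvCanonTbl = PySem.Dict.mk
      [("g", "kg"), ("ml", "l"), ("each", "piece"), ("pcs", "piece"),
       ("packet", "bag"), ("pack", "bag"), ("tray", "box")] := by decide
  simp [pvKnown] at hu
  obtain ⟨h1, h2, h3, h4, h5, h6, h7, h8, h9, h10, h11, h12⟩ := hu
  rw [pvCanon, hU]
  simp [PySem.Dict.get?,
    Ne.symm h2, Ne.symm h3, Ne.symm h6, Ne.symm h7, Ne.symm h9, Ne.symm h10, Ne.symm h12]

theorem pv_canon_known_mem (u : String) (hu : u ∈ pvKnown) : pvCanon u ∈ pvKnown := by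
  fin_cases hu <;> decide

theorem pv_loopA_of_not_known_right (u1 u2 : String) (hu : u2 ∉ pvKnown) :
    pvLoopA u1 u2 pvGroupsA = (u1 == u2) := by
  simp [pvKnown] at hu
  obtain ⟨h1, h2, h3, h4, h5, h6, h7, h8, h9, h10, h11, h12⟩ := hu
  simp [pvGroupsA, pvLoopA, PySem.Set.ofList, PySem.Set.add, PySem.Set.contains,
    PySem.Set.empty, List.foldl, h1, h2, h3, h4, h5, h6, h7, h8, h9, h10, h11, h12]

theorem pv_loopA_of_not_known_left (u1 u2 : String) (hu : u1 ∉ pvKnown) :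
    pvLoopA u1 u2 pvGroupsA = (u1 == u2) := by
  simp [pvKnown] at hu
  obtain ⟨h1, h2, h3, h4, h5, h6, h7, h8, h9, h10, h11, h12⟩ := hu
  simp [pvGroupsA, pvLoopA, PySem.Set.ofList, PySem.Set.add, PySem.Set.contains,
    PySem.Set.empty, List.foldl, h1, h2, h3, h4, h5, h6, h7, h8, h9, h10, h11, h12]

theorem pv_eq (u1 u2 : String) :
    compatible_units_py u1 u2 = compatible_units_py_alt u1 u2 := by
  by_cases hk1 : u1 ∈ pvKnown
  · by_cases hk2 : u2 ∈ pvKnown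
    · fin_cases hk1 <;> fin_cases hk2 <;> decide
    · -- u2 unknown: A side is u1 == u2 (false, since u1 is known); B side compares
      -- a known canonical against the unknown u2 itself, also false
      rw [compatible_units_py, pv_loopA_of_not_known_right u1 u2 hk2]
      rw [compatible_units_py_alt, pv_canon_of_not_known u2 hk2]
      have hc := pv_canon_known_mem u1 hk1
      have h1 : (u1 == u2) = false := by
        simp only [beq_eq_false_iff_ne]; rintro rfl; exact hk2 hk1
      have h2 : (pvCanon u1 == u2) = false := by
        simp only [beq_eq_false_iff_ne]; rintro rfl; exact hk2 hc
      rw [h1, h2]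
  · by_cases hk2 : u2 ∈ pvKnown
    · rw [compatible_units_py, pv_loopA_of_not_known_left u1 u2 hk1]
      rw [compatible_units_py_alt, pv_canon_of_not_known u1 hk1]
      have hc := pv_canon_known_mem u2 hk2
      have h1 : (u1 == u2) = false := by
        simp only [beq_eq_false_iff_ne]; rintro rfl; exact hk1 hk2
      have h2 : (u1 == pvCanon u2) = false := by
        simp only [beq_eq_false_iff_ne]; rintro rfl; exact hk1 hc
      rw [h1, h2]
    · rw [compatible_units_py, pv_loopA_of_not_known_left u1 u2 hk1]
      rw [compatible_units_py_alt, pv_canon_of_not_known u1 hk1,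
        pv_canon_of_not_known u2 hk2]

-- ===== VERDICT =====
theorem compatible_units_py_spec : Claim_equal_compatible_units_py := by
  intro u1 u2 _
  unfold Spec_compatible_units_py
  exact pv_eq u1 u2
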